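-- pv_equiv track=rewrite | github.com/dangoldner/qa_assist | emails.py | extract_new_content
-- ===== SOURCE A (Python) =====
-- def extract_new_content(msg_text):
--     """Extract new content from email, removing quoted replies."""
--     markers = ["\r\n\r\nOn ", "\r\nFrom: "]
--     positions = [msg_text.find(mark) for mark in markers]
--     valid_positions = [p for p in positions if p != -1]
--     if valid_positions:
--         split_point = min(valid_positions)
--         return msg_text[:split_point]
--     return msg_text
-- ===== SOURCE B (Python) =====
-- def extract_new_content(msg_text):
--     """Extract new content from email, removing quoted replies."""
--     markers = ("\r\n\r\nOn ", "\r\nFrom: ")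
--     for i in range(len(msg_text)):
--         if msg_text.startswith(markers, i):
--             return msg_text[:i]
--     return msg_text
-- ===== Notes on version B (the rewrite author's own statement) =====
-- stated objective: idiomatic
-- what changed: Replaces the two separate str.find scans plus list-filter-and-min with a single left-to-right scan that stops at the first index where either marker starts (str.startswith with a marker tuple).
import Mathlib
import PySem

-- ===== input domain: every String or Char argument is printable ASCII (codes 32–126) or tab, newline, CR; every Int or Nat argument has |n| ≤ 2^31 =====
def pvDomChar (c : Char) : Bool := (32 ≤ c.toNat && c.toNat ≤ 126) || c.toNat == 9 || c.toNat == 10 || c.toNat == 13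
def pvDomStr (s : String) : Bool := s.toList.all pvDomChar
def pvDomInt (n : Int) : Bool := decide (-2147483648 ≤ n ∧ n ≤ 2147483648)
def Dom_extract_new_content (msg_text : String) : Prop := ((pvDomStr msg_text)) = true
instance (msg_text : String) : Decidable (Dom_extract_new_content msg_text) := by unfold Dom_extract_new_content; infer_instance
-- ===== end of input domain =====

-- B replaces A's two full str.find scans plus filter-and-min with a single
-- left-to-right scan that stops at the first index where either marker starts (idiomatic; no speed claim).

-- ===== PORT A =====
def extract_new_content (msg_text : String) : String :=
  let markers : List String := ["\r\n\r\nOn ", "\r\nFrom: "]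
  let positions : List Int := markers.map (fun mark => PySem.Str.find msg_text mark)
  let valid_positions : List Int := positions.filter (fun p => p != -1)
  if valid_positions ≠ [] then
    match PySem.List.min? valid_positions (fun p => p) with
    | some split_point => PySem.Str.slice msg_text none (some split_point)
    | none => msg_text   -- unreachable: guarded by valid_positions ≠ []
  else msg_text

-- ===== PORT B =====
def pvMarker1 : List Char := ['\r', '\n', '\r', '\n', 'O', 'n', ' ']
def pvMarker2 : List Char := ['\r', '\n', 'F', 'r', 'o', 'm', ':', ' ']

-- the for-i loop of Source B: first index at which either marker starts
def pvScan : List Char → Nat → Option Nat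
  | [], _ => none
  | c :: rest, i =>
      if PySem.Chars.startswith (c :: rest) pvMarker1 || PySem.Chars.startswith (c :: rest) pvMarker2
      then some i
      else pvScan rest (i + 1)

def extract_new_content_alt (msg_text : String) : String :=
  match pvScan msg_text.toList 0 with
  | some i => PySem.Str.slice msg_text none (some (i : Int))
  | none => msg_text

-- ===== PRECONDITION & SPEC =====
def Spec_extract_new_content (msg_text : String) (out : String) : Prop := out = extract_new_content_alt msg_text
instance (msg_text : String) (out : String) : Decidable (Spec_extract_new_content msg_text out) := by unfold Spec_extract_new_content; infer_instance

-- ===== CLAIM (what is proved, stated in full; the proofs are below) =====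
def Claim_equal_extract_new_content : Prop := ∀ (msg_text : String), Dom_extract_new_content msg_text → Spec_extract_new_content msg_text (extract_new_content msg_text)

-- ===== LEMMAS AND PROOFS =====

theorem pvScan_none {cs : List Char} {i : Nat} (h : pvScan cs i = none) :
    ∀ k, ¬ pvMarker1 <+: cs.drop k ∧ ¬ pvMarker2 <+: cs.drop k := by
  induction cs generalizing i with
  | nil =>
    intro k
    simp only [List.drop_nil]
    constructor <;> (intro hp; simp [List.prefix_nil] at hp; simp [pvMarker1, pvMarker2] at hp)
  | cons c rest ih =>
    intro k
    rw [pvScan] at h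
    by_cases hc : (PySem.Chars.startswith (c :: rest) pvMarker1 || PySem.Chars.startswith (c :: rest) pvMarker2) = true
    · simp [hc] at h
    · rw [if_neg hc] at h
      cases k with
      | zero =>
        simp only [List.drop_zero]
        simp only [Bool.or_eq_true, not_or] at hc
        push Not at hc
        constructor
        · intro hp; exact hc.1 ((PySem.Chars.startswith_iff _ _).mpr hp)
        · intro hp; exact hc.2 ((PySem.Chars.startswith_iff _ _).mpr hp)
      | succ k' =>
        simp only [List.drop_succ_cons]
        exact ih h k' 

theorem pvScan_some {cs : List Char} {i j : Nat} (h : pvScan cs i = some j) :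
    ∃ k, j = i + k ∧
      (pvMarker1 <+: cs.drop k ∨ pvMarker2 <+: cs.drop k) ∧
      ∀ l < k, ¬ pvMarker1 <+: cs.drop l ∧ ¬ pvMarker2 <+: cs.drop l := by
  induction cs generalizing i with
  | nil => simp [pvScan] at h
  | cons c rest ih =>
    rw [pvScan] at h
    by_cases hc : (PySem.Chars.startswith (c :: rest) pvMarker1 || PySem.Chars.startswith (c :: rest) pvMarker2) = true
    · rw [if_pos hc] at h
      injection h with hij
      refine ⟨0, by omega, ?_, by omega⟩
      simp only [List.drop_zero]
      rcases Bool.or_eq_true_iff.mp hc with h1 | h2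
      · exact Or.inl ((PySem.Chars.startswith_iff _ _).mp h1)
      · exact Or.inr ((PySem.Chars.startswith_iff _ _).mp h2)
    · rw [if_neg hc] at h
      obtain ⟨k, hk, hP, hmin⟩ := ih h
      refine ⟨k + 1, by omega, by simpa using hP, ?_⟩
      intro l hl
      cases l with
      | zero =>
        simp only [List.drop_zero]
        simp only [Bool.or_eq_true, not_or] at hc
        push Not at hc
        exact ⟨fun hp => hc.1 ((PySem.Chars.startswith_iff _ _).mpr hp),
               fun hp => hc.2 ((PySem.Chars.startswith_iff _ _).mpr hp)⟩
      | succ l' =>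
        simp only [List.drop_succ_cons]
        exact hmin l' (by omega)

theorem pv_find_eq_of {M cs : List Char} {j : Nat} (h : M <+: cs.drop j)
    (hmin : ∀ l < j, ¬ M <+: cs.drop l) : PySem.Chars.find cs M = (j : Int) := by
  have hin : PySem.Chars.isIn M cs = true :=
    (PySem.Chars.exists_prefix_drop_iff_isIn _ _).mp ⟨j, h⟩
  have hinf : M <:+: cs := (PySem.Chars.isIn_iff_infix _ _).mp hin
  have hpos : 0 ≤ PySem.Chars.find cs M := (PySem.Chars.find_nonneg_iff _ _).mpr hinf
  obtain ⟨hpre, hfirst⟩ := PySem.Chars.find_spec hpos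
  have h1 : ¬ ((PySem.Chars.find cs M).toNat < j) := fun hlt => hmin _ hlt hpre
  have h2 : ¬ (j < (PySem.Chars.find cs M).toNat) := fun hlt => hfirst j hlt h
  omega

theorem pv_find_ge {M cs : List Char} {j : Nat}
    (hmin : ∀ l < j, ¬ M <+: cs.drop l) :
    PySem.Chars.find cs M = -1 ∨ (j : Int) ≤ PySem.Chars.find cs M := by
  by_cases hn : PySem.Chars.find cs M = -1
  · exact Or.inl hn
  · have hge : -1 ≤ PySem.Chars.find cs M := PySem.Chars.neg_one_le_find _ _
    have hpos : 0 ≤ PySem.Chars.find cs M := by omega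
    obtain ⟨hpre, _⟩ := PySem.Chars.find_spec hpos
    have h1 : ¬ ((PySem.Chars.find cs M).toNat < j) := fun hlt => hmin _ hlt hpre
    exact Or.inr (by omega)

-- ===== VERDICT (by name: the statement is the Claim_ definition above) =====
theorem extract_new_content_spec : Claim_equal_extract_new_content := by
  intro s _
  unfold Spec_extract_new_content extract_new_content extract_new_content_alt
  cases hscan : pvScan s.toList 0 with
  | none =>
    have hno := pvScan_none hscan
    have h1 : PySem.Chars.find s.toList pvMarker1 = -1 := by
      rw [PySem.Chars.find_eq_neg_one_iff]
      intro hinf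
      obtain ⟨j, hj⟩ := (PySem.Chars.exists_prefix_drop_iff_isIn _ _).mpr
        ((PySem.Chars.isIn_iff_infix _ _).mpr hinf)
      exact (hno j).1 hj
    have h2 : PySem.Chars.find s.toList pvMarker2 = -1 := by
      rw [PySem.Chars.find_eq_neg_one_iff]
      intro hinf
      obtain ⟨j, hj⟩ := (PySem.Chars.exists_prefix_drop_iff_isIn _ _).mpr
        ((PySem.Chars.isIn_iff_infix _ _).mpr hinf)
      exact (hno j).2 hj
    simp only [pvMarker1, pvMarker2] at h1 h2
    simp [h1, h2]
  | some j =>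
    obtain ⟨k, hk, hP, hmin⟩ := pvScan_some hscan
    have hk' : k = j := by omega
    subst hk'
    rcases hP with h1 | h2
    · have f1 : PySem.Chars.find s.toList pvMarker1 = (k : Int) :=
        pv_find_eq_of h1 (fun l hl => (hmin l hl).1)
      have hne1 : PySem.Chars.find s.toList pvMarker1 ≠ -1 := by omega
      rcases pv_find_ge (M := pvMarker2) (cs := s.toList) (j := k)
          (fun l hl => (hmin l hl).2) with f2 | f2
      · simp only [pvMarker1, pvMarker2] at f1 f2 hne1
        simp [f1, f2]
        rw [PySem.List.min?_id_cons]
        simp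
      · have hne2 : PySem.Chars.find s.toList pvMarker2 ≠ -1 := by omega
        have hmineq : min ((k : Int)) (PySem.Chars.find s.toList pvMarker2) = (k : Int) := by omega
        simp only [pvMarker1, pvMarker2] at f1 f2 hne1 hne2 hmineq
        simp [f1, hne2]
        rw [PySem.List.min?_id_cons]
        simp [hmineq]
    · have f2 : PySem.Chars.find s.toList pvMarker2 = (k : Int) :=
        pv_find_eq_of h2 (fun l hl => (hmin l hl).2)
      have hne2 : PySem.Chars.find s.toList pvMarker2 ≠ -1 := by omega
      rcases pv_find_ge (M := pvMarker1) (cs := s.toList) (j := k)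
          (fun l hl => (hmin l hl).1) with f1 | f1
      · simp only [pvMarker1, pvMarker2] at f1 f2 hne2
        simp [f1, f2]
        rw [PySem.List.min?_id_cons]
        simp
      · have hne1 : PySem.Chars.find s.toList pvMarker1 ≠ -1 := by omega
        have hmineq : min (PySem.Chars.find s.toList pvMarker1) ((k : Int)) = (k : Int) := by omega
        simp only [pvMarker1, pvMarker2] at f1 f2 hne1 hne2 hmineq
        simp [f2, hne1]
        rw [PySem.List.min?_id_cons]
        simp [hmineq]
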